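-- pv_equiv track=rewrite | github.com/rossby-sh/romsforge | packages/nipa_auto/src/preprocess/get_gfs_frcst.py | select_cumulative
-- ===== SOURCE A (Python) =====
-- from typing import Any, List, Tuple, Optional, Dict
--
-- def grep_lines(lines: List[str], pattern: str) -> List[str]:
--     return [ln for ln in lines if pattern in ln]
--
-- def pick_interval(lines: List[str], fhr: int) -> Optional[str]:
--     """
--     DSWRF/DLWRF/APCP 같은 interval/accum은 보통
--       0-3, 3-6, 6-9 ...
--     따라서 fhr=6이면 3-6을 골라야 함.
--     """
--     if not lines:
--         return None
--     if fhr < 3: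
--         return None
--     a = fhr - 3
--     b = fhr
--     key = f":{a}-{b} hour"
--     for ln in lines:
--         if key in ln:
--             return ln
--     # fallback: 일단 첫번째
--     return lines[0]
--
-- def select_cumulative(inv: List[str], fhr: int) -> Tuple[List[str], List[str]]:
--     """
--     cumulative/interval: swrad lwrad rain
--     DSWRF/DLWRF: ave, APCP: acc
--     """
--     pats = {
--         "swrad": ":DSWRF:surface:",
--         "lwrad": ":DLWRF:surface:",
--         "rain":  ":APCP:surface:",
--     }
--
--     picked: Dict[str, Optional[str]] = {k: None for k in pats}
--     for k, pat in pats.items():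
--         lst = grep_lines(inv, pat)
--         picked[k] = pick_interval(lst, fhr)
--
--     missing = [k for k in ["swrad","lwrad","rain"] if picked[k] is None]
--     out_lines = [picked[k] for k in ["swrad","lwrad","rain"] if picked[k] is not None]
--     return out_lines, missing
-- ===== SOURCE B (Python) =====
-- from typing import List, Tuple
--
-- def select_cumulative(inv: List[str], fhr: int) -> Tuple[List[str], List[str]]:
--     # One pass over inv: per category record the first pattern line and the
--     # first interval-key line; no intermediate filtered lists.
--     pats = [("swrad", ":DSWRF:surface:"),
--             ("lwrad", ":DLWRF:surface:"),
--             ("rain",  ":APCP:surface:")]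
--     key = f":{fhr - 3}-{fhr} hour"
--     first_pat = {k: None for k, _ in pats}
--     first_key = {k: None for k, _ in pats}
--     for ln in inv:
--         for k, pat in pats:
--             if pat in ln:
--                 if first_pat[k] is None:
--                     first_pat[k] = ln
--                 if first_key[k] is None and key in ln:
--                     first_key[k] = ln
--     out_lines: List[str] = []
--     missing: List[str] = []
--     for k, _ in pats:
--         if fhr < 3 or first_pat[k] is None:
--             missing.append(k)
--         else:
--             out_lines.append(first_key[k] if first_key[k] is not None else first_pat[k])
--     return out_lines, missing
-- ===== Notes on version B (the rewrite author's own statement) =====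
-- stated objective: alternative
-- what changed: Replaces the per-category filter-then-rescan (grep_lines builds an intermediate list which pick_interval scans again, with an indexed fallback) by a single fused pass over inv that tracks, per category, the first pattern line and the first interval-key line, then assembles the result from those trackers.
import Mathlib
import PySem

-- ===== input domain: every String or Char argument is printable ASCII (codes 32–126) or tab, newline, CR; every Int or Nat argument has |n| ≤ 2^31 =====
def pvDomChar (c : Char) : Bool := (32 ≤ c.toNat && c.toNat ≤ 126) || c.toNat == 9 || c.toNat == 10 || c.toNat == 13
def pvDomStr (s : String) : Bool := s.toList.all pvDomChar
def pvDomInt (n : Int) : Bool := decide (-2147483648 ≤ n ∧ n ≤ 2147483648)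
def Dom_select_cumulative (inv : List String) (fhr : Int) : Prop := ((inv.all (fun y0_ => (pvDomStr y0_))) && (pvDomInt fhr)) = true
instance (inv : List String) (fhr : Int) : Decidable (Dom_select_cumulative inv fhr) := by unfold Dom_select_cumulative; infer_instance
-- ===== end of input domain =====

-- B fuses A's per-category filter-then-rescan into one pass over inv with two
-- per-category trackers; return value only, no side effects.

-- ===== PORT A =====
def grep_lines (lines : List String) (pattern : String) : List String :=
  lines.filter (fun ln => PySem.Str.isIn pattern ln)

-- the 'for ln in lines: if key in ln: return ln' loop of pick_interval
def pickLoop (key : String) : List String → Option String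
  | [] => none
  | ln :: rest => if PySem.Str.isIn key ln then some ln else pickLoop key rest

def pick_interval (lines : List String) (fhr : Int) : Option String :=
  if lines = [] then none
  else if fhr < 3 then none
  else
    let key := ":" ++ PySem.Int.toStr (fhr - 3) ++ "-" ++ PySem.Int.toStr fhr ++ " hour"
    match pickLoop key lines with
    | some ln => some ln
    | none => PySem.List.pyGet? lines 0   -- lines[0]; lines ≠ [] here

def select_cumulative (inv : List String) (fhr : Int) : List String × List String :=
  let picked : PySem.Dict String (Option String) :=
    PySem.Dict.ofList
    [("swrad", pick_interval (grep_lines inv ":DSWRF:surface:") fhr),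
     ("lwrad", pick_interval (grep_lines inv ":DLWRF:surface:") fhr),
     ("rain",  pick_interval (grep_lines inv ":APCP:surface:") fhr)]
  let missing := (["swrad", "lwrad", "rain"]).filter
    (fun k => (PySem.Dict.getD picked k none).isNone)
  let out_lines := (["swrad", "lwrad", "rain"]).filterMap
    (fun k => PySem.Dict.getD picked k none)
  (out_lines, missing)

-- ===== PORT B =====
-- per-category tracker update: (first pattern line, first key line)
def updCat (pat key ln : String) (p : Option String × Option String) :
    Option String × Option String :=
  if PySem.Str.isIn pat ln then
    ((match p.1 with | some x => some x | none => some ln),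
     (match p.2 with
      | some x => some x
      | none => if PySem.Str.isIn key ln then some ln else none))
  else p

def pickB (fhr : Int) (p : Option String × Option String) : Option String :=
  if fhr < 3 ∨ p.1 = none then none
  else match p.2 with | some x => some x | none => p.1

def select_cumulative_alt (inv : List String) (fhr : Int) : List String × List String :=
  let key := ":" ++ PySem.Int.toStr (fhr - 3) ++ "-" ++ PySem.Int.toStr fhr ++ " hour"
  let st := inv.foldl
    (fun (st : (Option String × Option String) × (Option String × Option String) ×
               (Option String × Option String)) ln =>
      (updCat ":DSWRF:surface:" key ln st.1,
       updCat ":DLWRF:surface:" key ln st.2.1,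
       updCat ":APCP:surface:" key ln st.2.2))
    ((none, none), (none, none), (none, none))
  let cats := [("swrad", pickB fhr st.1), ("lwrad", pickB fhr st.2.1),
               ("rain", pickB fhr st.2.2)]
  cats.foldl
    (fun (acc : List String × List String) c =>
      match c.2 with
      | none => (acc.1, acc.2 ++ [c.1])
      | some v => (acc.1 ++ [v], acc.2))
    ([], [])

-- ===== PRECONDITION & SPEC =====
def Spec_select_cumulative (inv : List String) (fhr : Int) (out : List String × List String) : Prop := out = select_cumulative_alt inv fhr
instance (inv : List String) (fhr : Int) (out : List String × List String) : Decidable (Spec_select_cumulative inv fhr out) := by unfold Spec_select_cumulative; infer_instance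

-- ===== CLAIM (what is proved, stated in full; the proofs are below) =====
def Claim_equal_select_cumulative : Prop := ∀ (inv : List String) (fhr : Int), Dom_select_cumulative inv fhr → Spec_select_cumulative inv fhr (select_cumulative inv fhr)

-- ===== LEMMAS AND PROOFS =====

-- B's fused fold computes, per category, first pattern match and first pattern∧key match
theorem updCat_foldl (pat key : String) (xs : List String) (p : Option String × Option String) :
    xs.foldl (fun p ln => updCat pat key ln p) p
      = (p.1.orElse (fun _ => xs.find? (fun ln => PySem.Str.isIn pat ln)),
         p.2.orElse (fun _ => xs.find? (fun ln => PySem.Str.isIn pat ln && PySem.Str.isIn key ln))) := by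
  induction xs generalizing p with
  | nil => simp
  | cons x t ih =>
    rw [List.foldl_cons, ih]
    rcases p with ⟨a, b⟩
    by_cases hp : PySem.Chars.isIn pat.toList x.toList = true <;>
      by_cases hk : PySem.Chars.isIn key.toList x.toList = true <;>
        cases a <;> cases b <;>
          simp [updCat, hp, hk]

theorem triple_foldl (p1 p2 p3 key : String) (xs : List String)
    (s1 s2 s3 : Option String × Option String) :
    xs.foldl
        (fun (st : (Option String × Option String) × (Option String × Option String) ×
            (Option String × Option String)) ln =>
          (updCat p1 key ln st.1, updCat p2 key ln st.2.1, updCat p3 key ln st.2.2))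
        (s1, s2, s3)
      = (xs.foldl (fun p ln => updCat p1 key ln p) s1,
         xs.foldl (fun p ln => updCat p2 key ln p) s2,
         xs.foldl (fun p ln => updCat p3 key ln p) s3) := by
  induction xs generalizing s1 s2 s3 with
  | nil => rfl
  | cons x t ih =>
    simp only [List.foldl_cons]
    exact ih _ _ _

theorem find?_filter' (xs : List String) (p q : String → Bool) :
    (xs.filter p).find? q = xs.find? (fun x => p x && q x) := by
  induction xs with
  | nil => rfl
  | cons x t ih =>
    by_cases hp : p x = true <;> by_cases hq : q x = true <;>
      simp [hp, hq, ih]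

theorem head?_filter' (xs : List String) (p : String → Bool) :
    (xs.filter p).head? = xs.find? p := by
  induction xs with
  | nil => rfl
  | cons x t ih => by_cases hp : p x = true <;> simp [hp, ih]

theorem pickLoop_eq_find? (key : String) (xs : List String) :
    pickLoop key xs = xs.find? (fun ln => PySem.Str.isIn key ln) := by
  induction xs with
  | nil => rfl
  | cons x t ih =>
    by_cases hk : PySem.Chars.isIn key.toList x.toList = true <;>
      simp [pickLoop, hk, ih]

theorem updCat_foldl_none (pat key : String) (xs : List String) :
    xs.foldl (fun p ln => updCat pat key ln p) ((none : Option String), (none : Option String))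
      = (xs.find? (fun ln => PySem.Str.isIn pat ln),
         xs.find? (fun ln => PySem.Str.isIn pat ln && PySem.Str.isIn key ln)) := by
  rw [updCat_foldl]
  rfl

-- per category: A's filter-then-rescan pick equals B's tracker pick
theorem pick_cat (inv : List String) (fhr : Int) (pat : String) :
    pick_interval (grep_lines inv pat) fhr
      = pickB fhr
          (inv.find? (fun ln => PySem.Str.isIn pat ln),
           inv.find? (fun ln => PySem.Str.isIn pat ln &&
             PySem.Str.isIn (":" ++ PySem.Int.toStr (fhr - 3) ++ "-" ++ PySem.Int.toStr fhr ++ " hour") ln)) := by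
  simp only [pick_interval, pickB, grep_lines, pickLoop_eq_find?, find?_filter']
  by_cases he : inv.filter (fun ln => PySem.Str.isIn pat ln) = []
  · rw [if_pos he]
    have h2 : inv.find? (fun ln => PySem.Str.isIn pat ln) = none := by
      rw [List.find?_eq_none]
      intro x hx hpx
      have hx2 : x ∈ inv.filter (fun ln => PySem.Str.isIn pat ln) :=
        List.mem_filter.mpr ⟨hx, hpx⟩
      rw [he] at hx2
      exact absurd hx2 (List.not_mem_nil)
    rw [if_pos (Or.inr h2)]
  · rw [if_neg he]
    have h2 : inv.find? (fun ln => PySem.Str.isIn pat ln) ≠ none := by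
      intro hn
      exact he (List.filter_eq_nil_iff.mpr (fun x hx => List.find?_eq_none.mp hn x hx))
    by_cases hf : fhr < 3
    · rw [if_pos hf, if_pos (Or.inl hf)]
    · rw [if_neg hf, if_neg (fun h => h.elim hf h2)]
      cases hq : inv.find? (fun ln => PySem.Str.isIn pat ln &&
          PySem.Str.isIn (":" ++ PySem.Int.toStr (fhr - 3) ++ "-" ++ PySem.Int.toStr fhr ++ " hour") ln) with
      | some v => rfl
      | none =>
        have h3 : PySem.List.pyGet? (inv.filter (fun ln => PySem.Str.isIn pat ln)) 0
            = inv.find? (fun ln => PySem.Str.isIn pat ln) := by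
          rw [← head?_filter']
          cases inv.filter (fun ln => PySem.Str.isIn pat ln) <;>
            simp [PySem.List.pyGet?, PySem.List.pyIdx?]
        exact h3

theorem assemble (x y z : Option String) :
    ((["swrad", "lwrad", "rain"]).filterMap
        (fun k => PySem.Dict.getD (PySem.Dict.ofList [("swrad", x), ("lwrad", y), ("rain", z)]) k none),
      (["swrad", "lwrad", "rain"]).filter
        (fun k => (PySem.Dict.getD (PySem.Dict.ofList [("swrad", x), ("lwrad", y), ("rain", z)]) k none).isNone))
      = ([("swrad", x), ("lwrad", y), ("rain", z)]).foldl
          (fun (acc : List String × List String) c =>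
            match c.2 with
            | none => (acc.1, acc.2 ++ [c.1])
            | some v => (acc.1 ++ [v], acc.2))
          ([], []) := by
  cases x <;> cases y <;> cases z <;> rfl

-- ===== VERDICT (by name: the statement is the Claim_ definition above) =====
theorem select_cumulative_spec : Claim_equal_select_cumulative := by
  intro inv fhr _
  show select_cumulative inv fhr = select_cumulative_alt inv fhr
  simp only [select_cumulative, select_cumulative_alt, triple_foldl, updCat_foldl_none, pick_cat,
    assemble]
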